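-- pv_equiv track=rewrite | github.com/hanchihuang/x_search_aggregator | arxiv_title_survey.py | pick_method_sentence
-- ===== SOURCE A (Python) =====
-- METHOD_HINTS_STRONG = (
--     "we propose",
--     "we present",
--     "we introduce",
--     "propose",
--     "present",
--     "introduce",
--     "framework",
--     "approach",
--     "architecture",
--     "network",
--     "model",
-- )
--
-- METHOD_HINTS_WEAK = ("method", "design", "develop")
--
-- def pick_method_sentence(sentences: list[str], fallback: str = "") -> str:
--     for sentence in sentences:
--         lower = sentence.lower()
--         if any(hint in lower for hint in METHOD_HINTS_STRONG):
--             return sentence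
--     for sentence in sentences:
--         lower = sentence.lower()
--         if "current method" in lower or "current methods" in lower or "existing method" in lower:
--             continue
--         if any(hint in lower for hint in METHOD_HINTS_WEAK):
--             return sentence
--     return fallback
-- ===== SOURCE B (Python) =====
-- METHOD_HINTS_STRONG = (
--     "we propose",
--     "we present",
--     "we introduce",
--     "propose",
--     "present",
--     "introduce",
--     "framework",
--     "approach",
--     "architecture",
--     "network",
--     "model",
-- )
--
-- METHOD_HINTS_WEAK = ("method", "design", "develop")
--
--
-- def pick_method_sentence(sentences: list[str], fallback: str = "") -> str:
--     # Single pass: remember the first strong-hint sentence and the first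
--     # acceptable weak-hint sentence; strong wins, then weak, then fallback.
--     first_strong = None
--     first_weak = None
--     for sentence in sentences:
--         lower = sentence.lower()
--         if first_strong is None and any(h in lower for h in METHOD_HINTS_STRONG):
--             first_strong = sentence
--         if (first_weak is None
--                 and "current method" not in lower
--                 and "current methods" not in lower
--                 and "existing method" not in lower
--                 and any(h in lower for h in METHOD_HINTS_WEAK)):
--             first_weak = sentence
--     if first_strong is not None:
--         return first_strong
--     if first_weak is not None:
--         return first_weak
--     return fallback
-- ===== Notes on version B (the rewrite author's own statement) =====
-- stated objective: alternative
-- what changed: Replaces A's two sequential early-returning scans over the sentence list with one stateful pass that records the first strong-hint and first eligible weak-hint sentence and resolves the priority after the loop.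
import Mathlib
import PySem

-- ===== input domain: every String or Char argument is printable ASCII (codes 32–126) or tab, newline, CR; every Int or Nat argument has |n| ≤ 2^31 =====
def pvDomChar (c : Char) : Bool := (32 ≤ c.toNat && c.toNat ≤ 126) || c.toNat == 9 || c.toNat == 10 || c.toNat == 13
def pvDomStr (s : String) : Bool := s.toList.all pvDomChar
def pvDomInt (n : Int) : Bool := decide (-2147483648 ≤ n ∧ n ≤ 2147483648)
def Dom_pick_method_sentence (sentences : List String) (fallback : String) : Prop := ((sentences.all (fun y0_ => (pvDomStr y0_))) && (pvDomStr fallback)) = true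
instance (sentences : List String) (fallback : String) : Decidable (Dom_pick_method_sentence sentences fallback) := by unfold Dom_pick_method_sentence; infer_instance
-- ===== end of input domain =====

-- B replaces A's two early-returning scans with one stateful pass (objective: alternative decomposition, same cost).

-- shared module-level constants and the hint tests both Pythons spell the same way
def METHOD_HINTS_STRONG : List String :=
  ["we propose", "we present", "we introduce", "propose", "present", "introduce",
   "framework", "approach", "architecture", "network", "model"]

def METHOD_HINTS_WEAK : List String := ["method", "design", "develop"]

def hasStrong (low : String) : Bool := METHOD_HINTS_STRONG.any (fun h => PySem.Str.isIn h low)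

def hasWeak (low : String) : Bool := METHOD_HINTS_WEAK.any (fun h => PySem.Str.isIn h low)

def isExcluded (low : String) : Bool :=
  PySem.Str.isIn "current method" low || PySem.Str.isIn "current methods" low ||
    PySem.Str.isIn "existing method" low

-- ===== PORT A =====
-- first loop of A: return the first sentence with a strong hint
def firstStrongA : List String → Option String
  | [] => none
  | s :: rest => if hasStrong (PySem.Str.lower s) then some s else firstStrongA rest

-- second loop of A: skip excluded sentences, return the first with a weak hint
def firstWeakA : List String → Option String
  | [] => none
  | s :: rest =>
      let low := PySem.Str.lower s
      if isExcluded low then firstWeakA rest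
      else if hasWeak low then some s else firstWeakA rest

def pick_method_sentence (sentences : List String) (fallback : String) : String :=
  match firstStrongA sentences with
  | some s => s
  | none =>
      match firstWeakA sentences with
      | some s => s
      | none => fallback

-- ===== PORT B =====
-- one loop step updating (first_strong, first_weak)
def stepB (st : Option String × Option String) (sentence : String) : Option String × Option String :=
  let low := PySem.Str.lower sentence
  let fs := if st.1.isNone && hasStrong low then some sentence else st.1
  let fw := if st.2.isNone && !isExcluded low && hasWeak low then some sentence else st.2
  (fs, fw)

def pick_method_sentence_alt (sentences : List String) (fallback : String) : String :=
  match sentences.foldl stepB (none, none) with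
  | (some s, _) => s
  | (none, some w) => w
  | (none, none) => fallback

-- ===== PRECONDITION & SPEC =====
def Spec_pick_method_sentence (sentences : List String) (fallback : String) (out : String) : Prop := out = pick_method_sentence_alt sentences fallback
instance (sentences : List String) (fallback : String) (out : String) : Decidable (Spec_pick_method_sentence sentences fallback out) := by unfold Spec_pick_method_sentence; infer_instance

-- ===== CLAIM (what is proved, stated in full; the proofs are below) =====
def Claim_equal_pick_method_sentence : Prop := ∀ (sentences : List String) (fallback : String), Dom_pick_method_sentence sentences fallback → Spec_pick_method_sentence sentences fallback (pick_method_sentence sentences fallback)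

-- ===== LEMMAS AND PROOFS =====

-- how B renders a final state
def renderB (st : Option String × Option String) (fallback : String) : String :=
  match st with
  | (some s, _) => s
  | (none, some w) => w
  | (none, none) => fallback

-- invariant of B's fold: strong wins globally, each slot keeps its first hit
theorem foldB_render (l : List String) (fs fw : Option String) (fallback : String) :
    renderB (l.foldl stepB (fs, fw)) fallback =
      match fs with
      | some x => x
      | none =>
          match firstStrongA l with
          | some s => s
          | none =>
              match fw with
              | some y => y
              | none =>
                  match firstWeakA l with
                  | some s => s
                  | none => fallback := by
  induction l generalizing fs fw with
  | nil => cases fs <;> cases fw <;> simp [renderB, firstStrongA, firstWeakA]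
  | cons s rest ih =>
      simp only [List.foldl_cons, firstStrongA, firstWeakA, stepB]
      cases fs <;> cases fw <;>
        by_cases h1 : hasStrong (PySem.Str.lower s) <;>
        by_cases h2 : isExcluded (PySem.Str.lower s) <;>
        by_cases h3 : hasWeak (PySem.Str.lower s) <;>
        simp [h1, h2, h3, ih]

-- ===== VERDICT (by name: the statement is the Claim_ definition above) =====
theorem pick_method_sentence_spec : Claim_equal_pick_method_sentence := by
  intro sentences fallback _
  unfold Spec_pick_method_sentence
  have h2 : pick_method_sentence_alt sentences fallback =
      renderB (sentences.foldl stepB (none, none)) fallback := rfl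
  rw [h2, foldB_render]
  rfl
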